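-- pv_equiv track=rewrite | github.com/moltenisoy/botsos | src/vpn_manager.py | _extract_vpn_ip
-- ===== SOURCE A (Python) =====
-- from typing import Optional, List, Dict, Any, Callable
--
-- def _extract_vpn_ip(ipconfig_output: str) -> Optional[str]:
--     """Extrae la IP asignada por VPN del output de ipconfig."""
--     lines = ipconfig_output.split('\n')
--     for i, line in enumerate(lines):
--         if "TAP" in line or "OpenVPN" in line:
--             for j in range(i, min(i + 5, len(lines))):
--                 if "IPv4" in lines[j]:
--                     return lines[j].split(":")[-1].strip()
--     return None
-- ===== SOURCE B (Python) =====
-- from typing import Optional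
--
-- def _extract_vpn_ip(ipconfig_output: str) -> Optional[str]:
--     """Single linear pass with a 5-line window countdown that resets on each adapter marker."""
--     remaining = 0
--     for line in ipconfig_output.split('\n'):
--         if "TAP" in line or "OpenVPN" in line:
--             remaining = 5
--         if remaining > 0 and "IPv4" in line:
--             return line.split(":")[-1].strip()
--         remaining -= 1
--     return None
-- ===== Notes on version B (the rewrite author's own statement) =====
-- stated objective: simpler
-- what changed: Replaces A's nested loops (outer marker scan plus an inner 5-line re-indexing window for each marker) by a single linear pass over the lines that maintains a countdown window counter reset to 5 on each TAP/OpenVPN marker line.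
import Mathlib
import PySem

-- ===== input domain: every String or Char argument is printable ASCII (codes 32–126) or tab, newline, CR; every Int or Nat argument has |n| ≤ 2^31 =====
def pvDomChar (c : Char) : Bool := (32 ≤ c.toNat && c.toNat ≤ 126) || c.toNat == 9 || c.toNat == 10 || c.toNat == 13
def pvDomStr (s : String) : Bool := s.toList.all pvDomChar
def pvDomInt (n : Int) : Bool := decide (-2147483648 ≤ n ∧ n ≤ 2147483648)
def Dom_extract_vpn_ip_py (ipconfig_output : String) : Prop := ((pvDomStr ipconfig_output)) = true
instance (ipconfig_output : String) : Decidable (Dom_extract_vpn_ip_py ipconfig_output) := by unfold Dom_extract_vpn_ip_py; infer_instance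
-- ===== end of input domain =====

-- B replaces A's nested marker-then-window loops by one linear pass with a 5-line countdown (objective: simpler single pass).

-- ===== PORT A =====
-- s.split('\n'): the separator is a fixed non-empty literal, so split? always returns some.
def pvSplitNL (s : String) : List String := (PySem.Str.split? s "\n").getD []

-- inner loop 'for j in range(i, min(i+5, len(lines)))': lines[j] is always in range,
-- so the total indexing form pyGetD (exact on in-range indices) is used.
def pvInnerA (lines : List String) : List Int → Option String
  | [] => none
  | j :: js =>
    let lj := PySem.List.pyGetD lines j ""
    if PySem.Str.isIn "IPv4" lj then
      some (PySem.Str.strip (PySem.List.pyGetD ((PySem.Str.split? lj ":").getD []) (-1) ""))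
    else pvInnerA lines js

def pvOuterA (lines : List String) : List (Int × String) → Option String
  | [] => none
  | (i, line) :: rest =>
    if PySem.Str.isIn "TAP" line || PySem.Str.isIn "OpenVPN" line then
      match pvInnerA lines (PySem.List.pyRange i (min (i + 5) (lines.length : Int)) 1) with
      | some v => some v
      | none => pvOuterA lines rest
    else pvOuterA lines rest

def extract_vpn_ip_py (ipconfig_output : String) : Option String :=
  let lines := pvSplitNL ipconfig_output
  pvOuterA lines (PySem.List.enumerate lines 0)

-- ===== PORT B =====
def pvScanB : List String → Int → Option String
  | [], _ => none
  | l :: ls, r =>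
    let r1 : Int := if PySem.Str.isIn "TAP" l || PySem.Str.isIn "OpenVPN" l then 5 else r
    if r1 > 0 ∧ PySem.Str.isIn "IPv4" l then
      some (PySem.Str.strip (PySem.List.pyGetD ((PySem.Str.split? l ":").getD []) (-1) ""))
    else pvScanB ls (r1 - 1)

def extract_vpn_ip_py_alt (ipconfig_output : String) : Option String :=
  pvScanB (pvSplitNL ipconfig_output) 0

-- ===== PRECONDITION & SPEC =====
def Spec_extract_vpn_ip_py (ipconfig_output : String) (out : Option String) : Prop := out = extract_vpn_ip_py_alt ipconfig_output
instance (ipconfig_output : String) (out : Option String) : Decidable (Spec_extract_vpn_ip_py ipconfig_output out) := by unfold Spec_extract_vpn_ip_py; infer_instance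

-- ===== CLAIM (what is proved, stated in full; the proofs are below) =====
def Claim_equal_extract_vpn_ip_py : Prop := ∀ (ipconfig_output : String), Dom_extract_vpn_ip_py ipconfig_output → Spec_extract_vpn_ip_py ipconfig_output (extract_vpn_ip_py ipconfig_output)

-- ===== LEMMAS AND PROOFS =====

-- abbreviations used only by the proofs
def pvIp (l : String) : Bool := PySem.Str.isIn "IPv4" l
def pvMk (l : String) : Bool := PySem.Str.isIn "TAP" l || PySem.Str.isIn "OpenVPN" l
def pvEx (l : String) : String :=
  PySem.Str.strip (PySem.List.pyGetD ((PySem.Str.split? l ":").getD []) (-1) "")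

lemma pv_getD_drop (lines : List String) (i : Nat) (m : Nat) :
    (lines.drop i).getD m "" = PySem.List.pyGetD lines ((i : Int) + (m : Int)) "" := by
  rw [show ((i : Int) + (m : Int)) = ((i + m : Nat) : Int) by push_cast; ring,
    PySem.List.pyGetD_natCast]
  simp [List.getD_eq_getElem?_getD, List.getElem?_drop]

lemma innerA_eq_none (lines : List String) :
    ∀ (n : Nat) (a b : Int), (b - a).toNat = n →
      pvInnerA lines (PySem.List.pyRange a b 1) = none →
      ∀ j : Int, a ≤ j → j < b → pvIp (PySem.List.pyGetD lines j "") = false := by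
  intro n
  induction n with
  | zero =>
    intro a b hn _ j h1 h2; omega
  | succ n ih =>
    intro a b hn h j h1 h2
    have hab : a < b := by omega
    rw [PySem.List.pyRange_one_cons hab] at h
    simp only [pvInnerA] at h
    split at h
    · exact absurd h (by simp)
    · rcases eq_or_lt_of_le h1 with rfl | hlt
      · simp only [pvIp]; exact eq_false_of_ne_true ‹¬ _›
      · exact ih (a+1) b (by omega) h j hlt h2

lemma innerA_eq_some (lines : List String) :
    ∀ (n : Nat) (a b : Int) (v : String), (b - a).toNat = n →
      pvInnerA lines (PySem.List.pyRange a b 1) = some v →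
      ∃ j : Int, a ≤ j ∧ j < b ∧ pvIp (PySem.List.pyGetD lines j "") = true ∧
        v = pvEx (PySem.List.pyGetD lines j "") ∧
        ∀ m : Int, a ≤ m → m < j → pvIp (PySem.List.pyGetD lines m "") = false := by
  intro n
  induction n with
  | zero =>
    intro a b v hn h
    rw [PySem.List.pyRange_one_eq_nil (by omega)] at h
    simp [pvInnerA] at h
  | succ n ih =>
    intro a b v hn h
    have hab : a < b := by omega
    rw [PySem.List.pyRange_one_cons hab] at h
    simp only [pvInnerA] at h
    split at h
    · refine ⟨a, le_refl a, hab, by simpa only [pvIp] using ‹_›, by simpa [pvEx] using h.symm, ?_⟩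
      intro m h1 h2; omega
    · obtain ⟨j, hj1, hj2, hj3, hj4, hj5⟩ := ih (a+1) b v (by omega) h
      refine ⟨j, by omega, hj2, hj3, hj4, ?_⟩
      intro m h1 h2
      rcases eq_or_lt_of_le h1 with rfl | hlt
      · simp only [pvIp]; exact eq_false_of_ne_true ‹¬ _›
      · exact hj5 m hlt h2

lemma scanB_hits :
    ∀ (ls : List String) (r : Int) (j : Nat), j < ls.length → j ≤ 4 → (j : Int) + 1 ≤ r →
      (∀ m : Nat, m < j → pvIp (ls.getD m "") = false) →
      pvIp (ls.getD j "") = true →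
      pvScanB ls r = some (pvEx (ls.getD j "")) := by
  intro ls
  induction ls with
  | nil => intro r j hj; simp at hj
  | cons l ls ih =>
    intro r j hj hj4 hr hpre hip
    match j with
    | 0 =>
      simp only [List.getD_cons_zero] at hip
      simp only [pvScanB, pvIp, pvEx] at *
      rw [if_pos]
      · simp
      · constructor
        · split <;> omega
        · exact hip
    | Nat.succ j' =>
      have hipl : pvIp l = false := by
        have := hpre 0 (Nat.succ_pos j'); simpa using this
      simp only [pvScanB]
      rw [if_neg]
      · have := ih ((if PySem.Str.isIn "TAP" l || PySem.Str.isIn "OpenVPN" l then (5:Int) else r) - 1)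
          j' (by simpa using hj) (by omega) (by split <;> push_cast <;> omega)
          (fun m hm => by simpa using hpre (m+1) (by omega)) (by simpa using hip)
        simpa using this
      · intro hcond
        exact absurd hcond.2 (by simp [pvIp] at hipl; simp [hipl])

lemma main_invariant (lines : List String) :
    ∀ (n k : Nat) (r : Int), lines.length - k = n →
      (∀ j : Int, (k : Int) ≤ j → j < (k : Int) + r → j < (lines.length : Int) →
        pvIp (PySem.List.pyGetD lines j "") = false) →
      pvOuterA lines (PySem.List.enumerate (lines.drop k) k) = pvScanB (lines.drop k) r := by
  intro n
  induction n with
  | zero =>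
    intro k r hn _
    rw [List.drop_eq_nil_of_le (by omega)]
    simp [pvOuterA, pvScanB, PySem.List.enumerate]
  | succ n ih =>
    intro k r hn Hr
    have hk : k < lines.length := by omega
    rw [List.drop_eq_getElem_cons hk, PySem.List.enumerate_cons]
    set L := lines[k] with hL
    have hgetk : PySem.List.pyGetD lines (k : Int) "" = L := by
      rw [PySem.List.pyGetD_natCast, List.getD_eq_getElem lines "" hk]
    simp only [pvOuterA, pvScanB]
    by_cases hmk : (PySem.Str.isIn "TAP" L || PySem.Str.isIn "OpenVPN" L) = true
    · rw [if_pos hmk, if_pos hmk]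
      have hklt : (k : Int) < min ((k : Int) + 5) (lines.length : Int) := by
        simp only [lt_min_iff]; constructor <;> [omega; exact_mod_cast hk]
      rw [PySem.List.pyRange_one_cons hklt]
      simp only [pvInnerA, hgetk]
      by_cases hip : PySem.Str.isIn "IPv4" L = true
      · rw [if_pos hip, if_pos ⟨by norm_num, hip⟩]
      · rw [if_neg hip, if_neg (fun hc => hip hc.2),
          show (5 : Int) - 1 = 4 by norm_num]
        cases hin : pvInnerA lines (PySem.List.pyRange ((k : Int) + 1) (min ((k : Int) + 5) (lines.length : Int)) 1) with
        | none =>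
          have hnone := innerA_eq_none lines _ _ _ rfl hin
          have := ih (k + 1) 4 (by omega) (fun j h1 h2 h3 => by
            refine hnone j (by push_cast at h1 ⊢; omega) ?_
            simp only [lt_min_iff]; push_cast at h1 h2 ⊢; omega)
          simpa using this
        | some v =>
          obtain ⟨j, hj1, hj2, hj3, hj4, hj5⟩ := innerA_eq_some lines _ _ _ v rfl hin
          have hjlen : j < (lines.length : Int) := lt_of_lt_of_le hj2 (min_le_right _ _)
          have hjk5 : j < (k : Int) + 5 := lt_of_lt_of_le hj2 (min_le_left _ _)
          have key := scanB_hits (lines.drop (k + 1)) 4 (j - ((k : Int) + 1)).toNat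
            (by simp only [List.length_drop]; omega)
            (by omega) (by omega)
            (fun m hm => by
              rw [pv_getD_drop]
              exact hj5 (((k + 1 : Nat) : Int) + m) (by push_cast; omega) (by push_cast at hm ⊢; omega))
            (by rw [pv_getD_drop, show (((k + 1 : Nat) : Int) + ((j - ((k : Int) + 1)).toNat : Int)) = j by push_cast; omega]
                exact hj3)
          rw [key, pv_getD_drop, show (((k + 1 : Nat) : Int) + ((j - ((k : Int) + 1)).toNat : Int)) = j by push_cast; omega, ← hj4]
    · rw [if_neg hmk, if_neg hmk, if_neg (fun hc => by
        have h0 := Hr (k : Int) (le_refl _) (by omega) (by exact_mod_cast hk)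
        rw [hgetk] at h0
        exact absurd (hc.2.symm.trans h0) (by decide))]
      have := ih (k + 1) (r - 1) (by omega) (fun j h1 h2 h3 => Hr j (by push_cast at h1 ⊢; omega) (by push_cast at h2 ⊢; omega) h3)
      simpa using this

-- ===== VERDICT (by name: the statement is the Claim_ definition above) =====
theorem extract_vpn_ip_py_spec : Claim_equal_extract_vpn_ip_py := by
  intro s _
  unfold Spec_extract_vpn_ip_py extract_vpn_ip_py extract_vpn_ip_py_alt
  have h := main_invariant (pvSplitNL s)
    (pvSplitNL s).length 0 0 rfl (by intro j h1 h2; omega)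
  simpa using h
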